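-- pv_equiv track=rewrite | github.com/airaagusin/Automata | mealy_moore.py | moore_machine
-- ===== SOURCE A (Python) =====
-- def moore_machine(input_str):
--     """
--     Moore Machine that prints 'a' whenever '01' sequence is found.
--     Output depends on the current state only.
--     """
--     # Define state outputs
--     outputs = {
--         'A': 'b',
--         'B': 'b',
--         'C': 'a'
--     }
--
--     state = 'A'
--     output = [outputs[state]]
--
--     for symbol in input_str:
--         if state == 'A':
--             if symbol == '0':
--                 state = 'B'
--             else:
--                 state = 'A'
--         elif state == 'B':
--             if symbol == '0':
--                 state = 'B'
--             else:
--                 state = 'C'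
--         elif state == 'C':
--             if symbol == '0':
--                 state = 'B'
--             else:
--                 state = 'A'
--
--         output.append(outputs[state])
--
--     return ''.join(output)
-- ===== SOURCE B (Python) =====
-- def moore_machine(input_str):
--     """
--     Same output, no state machine: the original emits 'a' exactly when the
--     previous symbol was '0' and the current one is not '0'; 'b' otherwise
--     (including the initial output before any symbol).
--     """
--     result = ['b']
--     prev = None
--     for c in input_str:
--         result.append('a' if (prev == '0' and c != '0') else 'b')
--         prev = c
--     return ''.join(result)
-- ===== Notes on version B (the rewrite author's own statement) =====
-- stated objective: simpler
-- what changed: Replaces the three-state Moore machine and per-state output table with a single pass that looks only at the previous symbol: emit 'a' exactly when prev=='0' and the current symbol is not '0'.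
import Mathlib
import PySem

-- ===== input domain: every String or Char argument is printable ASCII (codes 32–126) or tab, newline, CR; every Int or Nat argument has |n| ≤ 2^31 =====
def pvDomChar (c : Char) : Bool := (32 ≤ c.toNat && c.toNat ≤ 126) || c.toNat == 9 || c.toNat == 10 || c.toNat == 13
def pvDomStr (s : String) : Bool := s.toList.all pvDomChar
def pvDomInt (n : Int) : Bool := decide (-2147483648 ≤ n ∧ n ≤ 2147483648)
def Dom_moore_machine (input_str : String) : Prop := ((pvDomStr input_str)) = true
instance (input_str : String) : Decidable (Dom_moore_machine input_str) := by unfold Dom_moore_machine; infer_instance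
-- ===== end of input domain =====

-- B drops the three-state machine and emits 'a' exactly when prev=='0' and the current symbol
-- is not '0' (objective: simpler). A is total; both ports are literal transliterations.

-- ===== PORT A =====
-- the literal `outputs` dict of A (keys are always present, so getD's default is never used)
def mooreOutputs : PySem.Dict String String :=
  PySem.Dict.ofList [("A", "b"), ("B", "b"), ("C", "a")]

-- one iteration of A's for-loop body: the if/elif chain updating `state`
def mooreStepA (state : String) (symbol : Char) : String :=
  if state = "A" then (if symbol = '0' then "B" else "A")
  else if state = "B" then (if symbol = '0' then "B" else "C")
  else if state = "C" then (if symbol = '0' then "B" else "A")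
  else state

def moore_machine (input_str : String) : String :=
  PySem.Str.join "" (input_str.toList.foldl
    (fun (acc : String × List String) symbol =>
      let s' := mooreStepA acc.1 symbol
      (s', acc.2 ++ [PySem.Dict.getD mooreOutputs s' ""]))
    ("A", [PySem.Dict.getD mooreOutputs "A" ""])).2

-- ===== PORT B =====
def moore_machine_alt (input_str : String) : String :=
  PySem.Str.join "" (input_str.toList.foldl
    (fun (acc : Option Char × List String) c =>
      (some c, acc.2 ++ [if acc.1 = some '0' ∧ c ≠ '0' then "a" else "b"]))
    ((none : Option Char), ["b"])).2

-- ===== PRECONDITION & SPEC =====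
def Spec_moore_machine (input_str : String) (out : String) : Prop := out = moore_machine_alt input_str
instance (input_str : String) (out : String) : Decidable (Spec_moore_machine input_str out) := by unfold Spec_moore_machine; infer_instance

-- ===== CLAIM (what is proved, stated in full; the proofs are below) =====
def Claim_equal_moore_machine : Prop := ∀ (input_str : String), Dom_moore_machine input_str → Spec_moore_machine input_str (moore_machine input_str)

-- ===== LEMMAS AND PROOFS =====

-- invariant linking A's state to B's previous symbol
def mooreRel (s : String) (p : Option Char) : Prop :=
  (s = "A" ∨ s = "B" ∨ s = "C") ∧ (s = "B" ↔ p = some '0')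

theorem moore_fold_eq (l : List Char) (s : String) (p : Option Char) (acc : List String)
    (h : mooreRel s p) :
    (l.foldl (fun (acc : String × List String) symbol =>
        let s' := mooreStepA acc.1 symbol
        (s', acc.2 ++ [PySem.Dict.getD mooreOutputs s' ""])) (s, acc)).2
    = (l.foldl (fun (acc : Option Char × List String) c =>
        (some c, acc.2 ++ [if acc.1 = some '0' ∧ c ≠ '0' then "a" else "b"])) (p, acc)).2 := by
  induction l generalizing s p acc with
  | nil => rfl
  | cons c t ih =>
    obtain ⟨hs, hb⟩ := h
    simp only [List.foldl_cons]
    have step : mooreStepA s c = (if c = '0' then "B" else if s = "B" then "C" else "A") := by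
      rcases hs with h' | h' | h' <;> subst h' <;> simp [mooreStepA]
    rw [step]
    by_cases hc : c = '0'
    · subst hc
      rw [if_pos rfl, if_neg (show ¬ (p = some '0' ∧ ('0' : Char) ≠ '0') from by simp)]
      exact ih "B" (some '0') _ ⟨Or.inr (Or.inl rfl), by simp⟩
    · by_cases hB : s = "B"
      · have hp : p = some '0' := hb.mp hB
        rw [if_neg hc, if_pos hB, hp, if_pos (show (some '0' : Option Char) = some '0' ∧ c ≠ '0' from ⟨rfl, hc⟩)]
        exact ih "C" (some c) _ ⟨Or.inr (Or.inr rfl), by constructor <;> intro h' <;> simp_all⟩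
      · have hp : p ≠ some '0' := fun h' => hB (hb.mpr h')
        rw [if_neg hc, if_neg hB, if_neg (show ¬ (p = some '0' ∧ c ≠ '0') from fun h' => hp h'.1)]
        exact ih "A" (some c) _ ⟨Or.inl rfl, by constructor <;> intro h' <;> simp_all⟩

-- ===== VERDICT (by name: the statement is the Claim_ definition above) =====
theorem moore_machine_spec : Claim_equal_moore_machine := by
  intro input_str _
  unfold Spec_moore_machine moore_machine moore_machine_alt
  rw [show PySem.Dict.getD mooreOutputs "A" "" = "b" from by decide,
      moore_fold_eq input_str.toList "A" none ["b"] ⟨Or.inl rfl, by simp⟩]
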